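-- pv_equiv track=rewrite | github.com/sanjithav/Traversals | traversals.py | column_zigzag_traversal
-- ===== SOURCE A (Python) =====
-- def column_zigzag_traversal(grid):
--     """Iterates over a 2D list by alternating between iterating
--     left to right and right to left, going from top to bottom and
--     returning the coordinates (row, column)."""
--     result=[]
--     rows = len(grid)
--     cols = len(grid[0])
--     for c in range(cols):
--         if c%2 != 0: #for odd cols, iterate backwords through rows
--             for r in range(rows-1,-1,-1):
--                 result.append((r,c))
--         else:
--             for r in range(rows):
--                 result.append((r,c))
--     return result
-- ===== SOURCE B (Python) =====
-- def column_zigzag_traversal(grid):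
--     """Iterates over a 2D list by alternating between iterating
--     left to right and right to left, going from top to bottom and
--     returning the coordinates (row, column)."""
--     rows = len(grid)
--     cols = len(grid[0])
--     out = []
--     for i in range(rows * cols):
--         c, r = divmod(i, rows)
--         if c % 2:
--             r = rows - 1 - r
--         out.append((r, c))
--     return out
-- ===== Notes on version B (the rewrite author's own statement) =====
-- stated objective: alternative
-- what changed: Replaces the nested column/row loops with a single flat loop over range(rows*cols) that derives each (row, col) coordinate by divmod index arithmetic, flipping the row for odd columns.
import Mathlib
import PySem

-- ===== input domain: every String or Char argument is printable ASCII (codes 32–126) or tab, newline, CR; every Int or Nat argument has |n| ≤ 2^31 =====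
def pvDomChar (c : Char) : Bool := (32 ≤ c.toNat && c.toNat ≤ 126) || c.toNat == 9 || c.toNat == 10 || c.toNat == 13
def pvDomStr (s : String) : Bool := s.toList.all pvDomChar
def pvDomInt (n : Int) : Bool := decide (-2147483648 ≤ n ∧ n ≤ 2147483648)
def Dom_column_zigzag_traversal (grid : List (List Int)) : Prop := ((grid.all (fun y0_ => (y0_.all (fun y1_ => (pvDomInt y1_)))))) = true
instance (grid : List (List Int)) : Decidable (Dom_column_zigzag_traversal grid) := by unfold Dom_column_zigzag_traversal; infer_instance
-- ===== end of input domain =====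

-- ===== PORT A =====
-- B replaces A's nested column/row loops by one flat loop with divmod index arithmetic (alternative decomposition, same cost); the claim is about the return value.
def column_zigzag_traversal (grid : List (List Int)) : List (Int × Int) :=
  let rows : Int := grid.length
  let cols : Int := (PySem.List.pyGetD grid 0 []).length
  (PySem.List.pyRange 0 cols 1).foldl (fun res c =>
    if PySem.Int.mod c 2 ≠ 0 then
      (PySem.List.pyRange (rows - 1) (-1) (-1)).foldl (fun res r => res ++ [(r, c)]) res
    else
      (PySem.List.pyRange 0 rows 1).foldl (fun res r => res ++ [(r, c)]) res) []

-- ===== PORT B =====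
def column_zigzag_traversal_alt (grid : List (List Int)) : List (Int × Int) :=
  let rows : Int := grid.length
  let cols : Int := (PySem.List.pyGetD grid 0 []).length
  (PySem.List.pyRange 0 (rows * cols) 1).foldl (fun out i =>
    let c := PySem.Int.floordiv i rows
    let r := PySem.Int.mod i rows
    let r := if PySem.Int.mod c 2 ≠ 0 then rows - 1 - r else r
    out ++ [(r, c)]) []

-- ===== PRECONDITION & SPEC =====
-- Pre_ excludes only the empty grid, on which both Pythons raise IndexError at grid[0].
def Pre_column_zigzag_traversal (grid : List (List Int)) : Prop := grid ≠ []
instance (grid : List (List Int)) : Decidable (Pre_column_zigzag_traversal grid) := by unfold Pre_column_zigzag_traversal; infer_instance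
def pvWitness_column_zigzag_traversal : List (List Int) := [[1, 2], [3, 4], [5, 6]]
def Spec_column_zigzag_traversal (grid : List (List Int)) (out : List (Int × Int)) : Prop := out = column_zigzag_traversal_alt grid
instance (grid : List (List Int)) (out : List (Int × Int)) : Decidable (Spec_column_zigzag_traversal grid out) := by unfold Spec_column_zigzag_traversal; infer_instance

-- ===== CLAIM (what is proved, stated in full; the proofs are below) =====
def Claim_equal_column_zigzag_traversal : Prop := ∀ (grid : List (List Int)), Dom_column_zigzag_traversal grid → Pre_column_zigzag_traversal grid → Spec_column_zigzag_traversal grid (column_zigzag_traversal grid)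

-- ===== LEMMAS AND PROOFS =====

-- the common boustrophedon column-major coordinate list, over naturals (proof helper)
def zigzagG (R C : Nat) : List (Int × Int) :=
  (List.range C).flatMap (fun c : Nat =>
    (List.range R).map (fun k : Nat =>
      ((if c % 2 = 1 then (R : Int) - 1 - (k : Int) else ((k : Nat) : Int)), ((c : Nat) : Int))))

lemma A_eq_G (R C : Nat) :
    (PySem.List.pyRange 0 (C : Int) 1).foldl (fun res c =>
      if PySem.Int.mod c 2 ≠ 0 then
        (PySem.List.pyRange ((R : Int) - 1) (-1) (-1)).foldl (fun res r => res ++ [(r, c)]) res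
      else
        (PySem.List.pyRange 0 (R : Int) 1).foldl (fun res r => res ++ [(r, c)]) res) []
    = zigzagG R C := by
  have hbody : ∀ (res : List (Int × Int)) (c : Int),
      (if PySem.Int.mod c 2 ≠ 0 then
        (PySem.List.pyRange ((R : Int) - 1) (-1) (-1)).foldl (fun res r => res ++ [(r, c)]) res
      else
        (PySem.List.pyRange 0 (R : Int) 1).foldl (fun res r => res ++ [(r, c)]) res)
      = res ++ (if PySem.Int.mod c 2 ≠ 0 then
          (PySem.List.pyRange ((R : Int) - 1) (-1) (-1)).map (fun r => (r, c))
        else (PySem.List.pyRange 0 (R : Int) 1).map (fun r => (r, c))) := by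
    intro res c
    split <;> rw [PySem.List.foldl_append_singleton_eq_map]
  simp only [hbody]
  rw [PySem.List.foldl_append_eq_flatMap, List.nil_append,
      PySem.List.pyRange_zero_natCast C, List.flatMap_map]
  unfold zigzagG
  congr 1; funext c
  have hm : PySem.Int.mod ((c : Nat) : Int) 2 = ((c % 2 : Nat) : Int) :=
    PySem.Int.mod_natCast c 2
  by_cases h : c % 2 = 1
  · rw [if_pos (by rw [hm, h]; norm_num), PySem.List.pyRange_neg_one]
    have h2 : (((R : Int) - 1) - (-1)).toNat = R := by omega
    rw [h2, List.map_map]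
    simp [h]
  · rw [if_neg (by rw [hm]; omega), PySem.List.pyRange_zero_natCast R, List.map_map]
    simp [h]


lemma B_eq_G (R C : Nat) :
    (PySem.List.pyRange 0 ((R : Int) * (C : Int)) 1).foldl (fun out i =>
      let c := PySem.Int.floordiv i (R : Int)
      let r := PySem.Int.mod i (R : Int)
      let r := if PySem.Int.mod c 2 ≠ 0 then (R : Int) - 1 - r else r
      out ++ [(r, c)]) []
    = zigzagG R C := by
  show (PySem.List.pyRange 0 ((R : Int) * (C : Int)) 1).foldl (fun out i =>
      out ++ [(if PySem.Int.mod (PySem.Int.floordiv i (R:Int)) 2 ≠ 0 then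
          (R:Int) - 1 - PySem.Int.mod i (R:Int) else PySem.Int.mod i (R:Int),
        PySem.Int.floordiv i (R:Int))]) [] = zigzagG R C
  induction C with
  | zero => simp [PySem.List.pyRange_one_eq_nil, zigzagG]
  | succ n ih =>
    have hsplit : PySem.List.pyRange 0 ((R : Int) * ((n+1 : Nat) : Int)) 1
        = PySem.List.pyRange 0 ((R : Int) * (n : Int)) 1
          ++ PySem.List.pyRange ((R : Int) * (n : Int)) ((R : Int) * ((n+1 : Nat) : Int)) 1 := by
      apply PySem.List.pyRange_one_append <;> push_cast <;>
        nlinarith [Nat.cast_nonneg (α := Int) R, Nat.cast_nonneg (α := Int) n]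
    rw [hsplit, List.foldl_append, ih]
    rw [PySem.List.foldl_append_eq_flatMap
      (g := fun i => [(if PySem.Int.mod (PySem.Int.floordiv i (R:Int)) 2 ≠ 0 then (R:Int) - 1 - PySem.Int.mod i (R:Int) else PySem.Int.mod i (R:Int), PySem.Int.floordiv i (R:Int))])]
    unfold zigzagG
    rw [List.range_succ, List.flatMap_append, List.flatMap_singleton]
    congr 1
    rw [PySem.List.pyRange_one]
    have hlen : ((R : Int) * ((n+1 : Nat) : Int) - (R : Int) * (n : Int)).toNat = R := by
      have : (R : Int) * ((n+1 : Nat) : Int) - (R : Int) * (n : Int) = (R : Int) := by push_cast; ring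
      rw [this]; omega
    rw [hlen, List.flatMap_map]
    have : ∀ k ∈ List.range R,
        [(if PySem.Int.mod (PySem.Int.floordiv ((R:Int)*(n:Int) + (k:Int)) (R:Int)) 2 ≠ 0 then
            (R:Int) - 1 - PySem.Int.mod ((R:Int)*(n:Int) + (k:Int)) (R:Int)
          else PySem.Int.mod ((R:Int)*(n:Int) + (k:Int)) (R:Int),
          PySem.Int.floordiv ((R:Int)*(n:Int) + (k:Int)) (R:Int))]
        = [((if n % 2 = 1 then (R : Int) - 1 - (k : Int) else (k : Int)), (n : Int))] := by
      intro k hk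
      have hkR : k < R := List.mem_range.mp hk
      have hi : (R : Int) * (n : Int) + (k : Int) = ((R * n + k : Nat) : Int) := by push_cast; ring
      have hdiv : PySem.Int.floordiv ((R : Int) * (n : Int) + (k : Int)) (R : Int) = (n : Int) := by
        rw [hi, PySem.Int.floordiv_natCast]
        congr 1
        rw [Nat.mul_add_div (by omega), Nat.div_eq_of_lt hkR]; omega
      have hmod : PySem.Int.mod ((R : Int) * (n : Int) + (k : Int)) (R : Int) = (k : Int) := by
        rw [hi, PySem.Int.mod_natCast]
        congr 1
        rw [Nat.mul_add_mod, Nat.mod_eq_of_lt hkR]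
      rw [hdiv, hmod]
      have hm : PySem.Int.mod ((n:Int)) 2 = ((n % 2 : Nat) : Int) := PySem.Int.mod_natCast n 2
      by_cases h : n % 2 = 1
      · rw [if_pos (by rw [hm, h]; norm_num), if_pos h]
      · rw [if_neg (by rw [hm]; omega), if_neg h]
    rw [List.flatMap_congr this]
    exact List.map_eq_flatMap.symm

-- ===== VERDICT (by name: the statement is the Claim_ definition above) =====
theorem column_zigzag_traversal_spec : Claim_equal_column_zigzag_traversal := by
  intro grid _ _
  show column_zigzag_traversal grid = column_zigzag_traversal_alt grid
  exact (A_eq_G grid.length (PySem.List.pyGetD grid 0 []).length).trans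
        (B_eq_G grid.length (PySem.List.pyGetD grid 0 []).length).symm
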